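-- pv_equiv track=rewrite | github.com/MLouis8/robinson-shensted | algo/algorithms.py | evacuation
-- ===== SOURCE A (Python) =====
-- from typing import List, Tuple
--
-- Involution = List[List[int]]
--
-- Tableau = Tuple[List[int], List[int]]
--
-- def evacuation(inv: Involution) -> Tableau:
--     """Killpatrick's evacuation algorithm.
--     Relation: Involution inv -> path tableau
--
--     Attention on suppose ici que p[0][0] contienne le nombre d'elements de p
--     0 stands for empty
--
--     >>> evacuation(([[7, 3], [6, 4], [5, 0], [2, 1]]))
--     ([3, 5, 7, 1], [4, 6, 0, 2])
--     """
--
--     def find_evac_point(p: Involution) -> Tuple[int, int, int]: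
--         def compare_neighbors(i: int, j: int, inv: Involution) -> Tuple[int, int]:
--             if inv[i][j + 1] == 0:  # ligne dessus vide
--                 inv[i][j] = 0
--                 return j, i
--             if (
--                 len(inv) == i + 1 or inv[i + 1][j] == 0 or inv[i][j + 1] > inv[i + 1][j]
--             ):  # fin de la liste ou voisin droite vide ou voisin dessus > voisin droite
--                 inv[i][j] = inv[i][j + 1]
--                 inv[i][j + 1] = 0
--                 return j + 1, i
--             else:  # voisin dessus <= voisin droite
--                 inv[i][j] = inv[i + 1][j]
--                 inv[i + 1][j] = 0
--                 return compare_neighbors(i + 1, j, inv)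
--
--         i = 0
--         while inv[i][0] == 0:
--             i += 1
--         tmp = inv[i][0]
--         x, y = compare_neighbors(i, 0, inv)
--         return tmp, x, y
--
--     path_tableau: Tableau = ([0] * len(inv), [0] * len(inv))
--     for i in range(inv[0][0]):
--         e, x, y = find_evac_point(inv)
--         path_tableau[x][y] = e
--     return path_tableau
-- ===== SOURCE B (Python) =====
-- from typing import List, Tuple
--
-- Involution = List[List[int]]
--
-- Tableau = Tuple[List[int], List[int]]
--
-- # Only the first two columns of inv are ever touched by the algorithm, so B
-- # flattens the grid into two flat arrays (left/right column) and replaces the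
-- # recursive compare_neighbors with an iterative chain; B does not mutate inv.
-- def evacuation(inv: Involution) -> Tableau:
--     n = len(inv)
--     left = [(row[0] if len(row) > 0 else 0) for row in inv]
--     right = [(row[1] if len(row) > 1 else 0) for row in inv]
--     out: Tableau = ([0] * n, [0] * n)
--     for _ in range(inv[0][0]):
--         i = 0
--         while left[i] == 0:
--             i += 1
--         e = left[i]
--         x = -1
--         while x < 0:
--             if right[i] == 0:
--                 left[i] = 0
--                 x = 0
--             elif i + 1 == n or left[i + 1] == 0 or right[i] > left[i + 1]:
--                 left[i] = right[i]
--                 right[i] = 0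
--                 x = 1
--             else:
--                 left[i] = left[i + 1]
--                 left[i + 1] = 0
--                 i += 1
--         out[x][i] = e
--     return out
-- ===== Notes on version B (the rewrite author's own statement) =====
-- stated objective: alternative
-- what changed: B observes that the algorithm only ever touches the first two columns of the grid, so it flattens the input once into two flat arrays (left/right column) and replaces the recursive compare_neighbors on the nested list with an iterative chain loop over those arrays; B also does not mutate its argument.
-- outside the precondition, e.g. on evacuation([[2, -3], [0, 4], []]): A returns ([-3, 0, 0], [2, 0, 0]), B returns ([-3, 0, 0], [2, 0, 0])
import Mathlib
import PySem

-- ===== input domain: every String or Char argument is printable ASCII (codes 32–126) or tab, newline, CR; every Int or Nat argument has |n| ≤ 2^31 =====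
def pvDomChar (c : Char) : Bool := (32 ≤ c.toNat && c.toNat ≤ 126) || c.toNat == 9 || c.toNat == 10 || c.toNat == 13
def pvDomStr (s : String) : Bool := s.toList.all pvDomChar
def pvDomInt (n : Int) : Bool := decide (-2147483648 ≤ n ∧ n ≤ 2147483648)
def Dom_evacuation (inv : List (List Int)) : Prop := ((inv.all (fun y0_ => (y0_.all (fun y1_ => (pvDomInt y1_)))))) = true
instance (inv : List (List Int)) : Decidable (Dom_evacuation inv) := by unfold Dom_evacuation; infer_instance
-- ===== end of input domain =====

-- B flattens the grid into its two used columns (flat arrays) and replaces the recursive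
-- inner helper by an iterative chain loop; equivalence is about the RETURN value only
-- (Python A mutates its argument in place, B does not).


-- ===== PORT A =====
-- `while inv[i][0] == 0: i += 1`; none = IndexError (i runs off the rows, or a row is empty)
def scanA (g : List (List Int)) (i : Nat) : Option Nat :=
  match hrow : g[i]? with
  | none => none
  | some row =>
    match row[0]? with
    | none => none
    | some v => if v = 0 then scanA g (i + 1) else some i
termination_by g.length - i
decreasing_by
  have hi : i < g.length := (List.getElem?_eq_some_iff.mp hrow).1
  omega

-- compare_neighbors; none = IndexError on a cell read
def cmpA (g : List (List Int)) (i j : Nat) : Option ((Nat × Nat) × List (List Int)) :=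
  match g[i]? with
  | none => none
  | some rowi =>
    match rowi[j + 1]? with
    | none => none
    | some v1 =>
      if v1 = 0 then
        some ((j, i), g.set i (rowi.set j 0))
      else if g.length = i + 1 then
        some ((j + 1, i), g.set i ((rowi.set j v1).set (j + 1) 0))
      else
        match hri1 : (g.set i rowi)[i + 1]? with   -- rows i and i+1 are distinct; read of inv[i+1][j]
        | none => none
        | some rowi1 =>
          match rowi1[j]? with
          | none => none
          | some v2 =>
            if v2 = 0 ∨ v1 > v2 then
              some ((j + 1, i), g.set i ((rowi.set j v1).set (j + 1) 0))
            else
              cmpA ((g.set i (rowi.set j v2)).set (i + 1) (rowi1.set j 0)) (i + 1) j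
termination_by g.length - i
decreasing_by
  have hi : i + 1 < (g.set i rowi).length := (List.getElem?_eq_some_iff.mp hri1).1
  simp only [List.length_set] at *
  omega

-- find_evac_point
def findA (g : List (List Int)) : Option (Int × (Nat × Nat) × List (List Int)) :=
  match scanA g 0 with
  | none => none
  | some i =>
    let tmp := (g.getD i []).getD 0 0
    match cmpA g i 0 with
    | none => none
    | some (xy, g') => some (tmp, xy, g')

-- `for i in range(inv[0][0]): e, x, y = find_evac_point(inv); path_tableau[x][y] = e`
def evacLoopA (g : List (List Int)) (t0 t1 : List Int) (count : Nat) : List Int × List Int :=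
  match count with
  | 0 => (t0, t1)
  | c + 1 =>
    match findA g with
    | none => (t0, t1)   -- Python raises here; unreachable under Pre_
    | some (e, (x, y), g') =>
      evacLoopA g' (if x = 0 then t0.set y e else t0) (if x = 1 then t1.set y e else t1) c

def evacuation (inv : List (List Int)) : List Int × List Int :=
  evacLoopA inv (List.replicate inv.length 0) (List.replicate inv.length 0)
    ((inv.getD 0 []).getD 0 0).toNat

-- ===== PORT B =====
-- `while left[i] == 0: i += 1`
def scanB (l : List Int) (i : Nat) : Option Nat :=
  match hv : l[i]? with
  | none => none
  | some v => if v = 0 then scanB l (i + 1) else some i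
termination_by l.length - i
decreasing_by
  have hi : i < l.length := (List.getElem?_eq_some_iff.mp hv).1
  omega

-- the iterative chain loop of B, on the two flat column arrays
def chainB (n : Nat) (l r : List Int) (i : Nat) : Nat × Nat × List Int × List Int :=
  if r.getD i 0 = 0 then
    (0, i, l.set i 0, r)
  else if i + 1 = n ∨ l.getD (i + 1) 0 = 0 ∨ r.getD i 0 > l.getD (i + 1) 0 then
    (1, i, l.set i (r.getD i 0), r.set i 0)
  else
    chainB n ((l.set i (l.getD (i + 1) 0)).set (i + 1) 0) r (i + 1)
termination_by l.length - i
decreasing_by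
  rename_i h2
  have : l.getD (i + 1) 0 ≠ 0 := by
    intro h; exact h2 (Or.inr (Or.inl h))
  have hi : i + 1 < l.length := by
    by_contra hle
    exact this (List.getD_eq_default _ _ (by omega))
  simp only [List.length_set]
  omega

def loopB (n : Nat) (l r t0 t1 : List Int) (count : Nat) : List Int × List Int :=
  match count with
  | 0 => (t0, t1)
  | c + 1 =>
    match scanB l 0 with
    | none => (t0, t1)   -- Python raises here; unreachable under Pre_
    | some i =>
      let e := l.getD i 0
      match chainB n l r i with
      | (x, y, l', r') =>
        loopB n l' r' (if x = 0 then t0.set y e else t0) (if x = 1 then t1.set y e else t1) c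

def evacuation_alt (inv : List (List Int)) : List Int × List Int :=
  let n := inv.length
  let l := inv.map (fun row => row.getD 0 0)
  let r := inv.map (fun row => row.getD 1 0)
  loopB n l r (List.replicate n 0) (List.replicate n 0) ((inv.getD 0 []).getD 0 0).toNat

-- ===== PRECONDITION & SPEC =====
-- Pre_ restricts to the format Killpatrick's algorithm is written for: a nonempty grid of
-- rows of length ≥ 2, filled left-justified (a nonzero right cell has a nonzero left cell),
-- holding at least inv[0][0] nonzero values; these conditions are only needed when
-- inv[0][0] ≥ 1 (otherwise the loop body never runs).  This excludes some malformed grids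
-- on which A happens to return by accident (see the cited examples; B agrees with A there too).
def Pre_evacuation (inv : List (List Int)) : Prop :=
  inv ≠ [] ∧ inv.getD 0 [] ≠ [] ∧
  (1 ≤ (inv.getD 0 []).getD 0 0 →
    (∀ row ∈ inv, 2 ≤ row.length) ∧
    (∀ row ∈ inv, row.getD 1 0 ≠ 0 → row.getD 0 0 ≠ 0) ∧
    (inv.getD 0 []).getD 0 0 ≤
      (((inv.map (fun row => row.getD 0 0)).countP (· != 0)
        + (inv.map (fun row => row.getD 1 0)).countP (· != 0) : Nat) : Int))

instance (inv : List (List Int)) : Decidable (Pre_evacuation inv) := by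
  unfold Pre_evacuation; infer_instance

def pvWitness_evacuation : List (List Int) := [[7, 3], [6, 4], [5, 0], [2, 1]]

def Spec_evacuation (inv : List (List Int)) (out : List Int × List Int) : Prop := out = evacuation_alt inv
instance (inv : List (List Int)) (out : List Int × List Int) : Decidable (Spec_evacuation inv out) := by unfold Spec_evacuation; infer_instance

-- ===== CLAIM (what is proved, stated in full; the proofs are below) =====
def Claim_equal_evacuation : Prop := ∀ (inv : List (List Int)), Dom_evacuation inv → Pre_evacuation inv → Spec_evacuation inv (evacuation inv)

-- ===== LEMMAS AND PROOFS =====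

-- the two columns the algorithm works on
def colL (g : List (List Int)) : List Int := g.map (fun row => row.getD 0 0)
def colR (g : List (List Int)) : List Int := g.map (fun row => row.getD 1 0)

theorem getD_map_lt (f : List Int → Int) (g : List (List Int)) (i : Nat) (h : i < g.length) :
    (g.map f).getD i 0 = f g[i] := by
  simp [List.getD_eq_getElem?_getD, List.getElem?_map, List.getElem?_eq_getElem h]

theorem getD_set_self (l : List Int) (i : Nat) (a : Int) (h : i < l.length) :
    (l.set i a).getD i 0 = a := by
  simp [List.getD_eq_getElem?_getD, h]

theorem getD_set_ne (l : List Int) (i j : Nat) (a : Int) (h : i ≠ j) :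
    (l.set i a).getD j 0 = l.getD j 0 := by
  simp [List.getD_eq_getElem?_getD, List.getElem?_set_ne h]

theorem set_getD_cancel (l : List Int) (i : Nat) (h : i < l.length) :
    l.set i (l.getD i 0) = l := by
  rw [List.getD_eq_getElem?_getD, List.getElem?_eq_getElem h]
  exact List.set_getElem_self h

theorem getD_lt (l : List Int) (i : Nat) (h : i < l.length) : l.getD i 0 = l[i] := by
  simp [List.getD_eq_getElem?_getD, List.getElem?_eq_getElem h]

theorem getD_pos_lt (l : List Int) (i : Nat) (h : l.getD i 0 ≠ 0) : i < l.length := by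
  by_contra hle
  exact h (List.getD_eq_default _ _ (by omega))

-- A's row scan equals B's scan on the left column
theorem scanA_eq (g : List (List Int)) (hrows : ∀ row ∈ g, 1 ≤ row.length) (i : Nat) :
    scanA g i = scanB (colL g) i := by
  fun_induction scanA g i with
  | case1 i hrow =>
    rw [scanB]
    have h1 : (colL g)[i]? = none := by simp [colL, List.getElem?_map, hrow]
    rw [h1]
  | case2 i row hrow h0 =>
    have h1 := List.getElem?_eq_none_iff.mp h0
    have h2 := hrows row (List.mem_of_getElem? hrow)
    omega
  | case3 i row hrow h0 ih =>
    rw [scanB]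
    have h1 : (colL g)[i]? = some (row.getD 0 0) := by simp [colL, List.getElem?_map, hrow]
    have hvv : row.getD 0 0 = 0 := by simp [List.getD_eq_getElem?_getD, h0]
    rw [h1, hvv]
    simpa using ih
  | case4 i row hrow v h0 hv =>
    rw [scanB]
    have h1 : (colL g)[i]? = some (row.getD 0 0) := by simp [colL, List.getElem?_map, hrow]
    have hvv : row.getD 0 0 = v := by simp [List.getD_eq_getElem?_getD, h0]
    rw [h1, hvv]
    simp [hv]

-- a failed scan means the whole suffix of the left column is zero
theorem scanB_none (l : List Int) (i : Nat) (h : scanB l i = none) :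
    ∀ j, i ≤ j → l.getD j 0 = 0 := by
  fun_induction scanB l i with
  | case1 i hv =>
    intro j hj
    have : l.length ≤ i := List.getElem?_eq_none_iff.mp hv
    exact List.getD_eq_default _ _ (by omega)
  | case2 i hv ih =>
    intro j hj
    rcases Nat.eq_or_lt_of_le hj with rfl | hlt
    · simp [List.getD_eq_getElem?_getD, hv]
    · exact ih h j hlt
  | case3 i v hv hne =>
    simp at h

theorem scanB_some (l : List Int) (i k : Nat) (h : scanB l i = some k) :
    k < l.length ∧ l.getD k 0 ≠ 0 := by
  fun_induction scanB l i with
  | case1 i hv => simp at h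
  | case2 i hv ih => exact ih h
  | case3 i v hv hne =>
    obtain rfl : i = k := by simpa using h
    exact ⟨(List.getElem?_eq_some_iff.mp hv).1, by simp [List.getD_eq_getElem?_getD, hv, hne]⟩

theorem exists_left_nonzero (l r : List Int)
    (hinv : ∀ j, r.getD j 0 ≠ 0 → l.getD j 0 ≠ 0)
    (hcnt : 1 ≤ l.countP (· != 0) + r.countP (· != 0)) :
    ∃ j, l.getD j 0 ≠ 0 := by
  by_cases hl : 0 < l.countP (· != 0)
  · obtain ⟨a, ha, hane⟩ := List.countP_pos_iff.mp hl
    obtain ⟨j, hj, rfl⟩ := List.mem_iff_getElem.mp ha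
    exact ⟨j, by simp [List.getD_eq_getElem?_getD, List.getElem?_eq_getElem hj]; simpa using hane⟩
  · have hr : 0 < r.countP (· != 0) := by omega
    obtain ⟨a, ha, hane⟩ := List.countP_pos_iff.mp hr
    obtain ⟨j, hj, rfl⟩ := List.mem_iff_getElem.mp ha
    refine ⟨j, hinv j ?_⟩
    simp [List.getD_eq_getElem?_getD, List.getElem?_eq_getElem hj]; simpa using hane

-- behaviour of B's chain loop: left-justifiedness is restored and exactly one value is consumed
theorem chainB_spec (N : Nat) (l r : List Int) (i : Nat)
    (hN : N = l.length) (hi : i < l.length) (hlen : r.length = l.length)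
    (hinv : ∀ j, j ≠ i → r.getD j 0 ≠ 0 → l.getD j 0 ≠ 0) :
    ∃ x y l' r', chainB N l r i = (x, y, l', r') ∧
      l'.length = l.length ∧ r'.length = r.length ∧
      (∀ j, r'.getD j 0 ≠ 0 → l'.getD j 0 ≠ 0) ∧
      l'.countP (· != 0) + r'.countP (· != 0) + (if l.getD i 0 = 0 then 0 else 1)
        = l.countP (· != 0) + r.countP (· != 0) := by
  revert hN hi hlen hinv
  fun_induction chainB N l r i with
  | case1 l i h1 =>
    intro hN hi hlen hinv
    refine ⟨0, i, l.set i 0, r, rfl, by simp, rfl, ?_, ?_⟩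
    · intro j hj
      have hji : i ≠ j := by rintro rfl; exact hj h1
      rw [getD_set_ne _ _ _ _ hji]
      exact hinv j (Ne.symm hji) hj
    · rw [List.countP_set hi, getD_lt _ _ hi]
      by_cases hz : l[i] = 0
      · simp [hz]
      · have hpos : 0 < l.countP (· != 0) :=
          List.countP_pos_iff.mpr ⟨l[i], List.getElem_mem hi, by simpa using hz⟩
        simp [hz]
        omega
  | case2 l i h1 h2 =>
    intro hN hi hlen hinv
    have hir : i < r.length := by omega
    refine ⟨1, i, l.set i (r.getD i 0), r.set i 0, rfl, by simp, by simp, ?_, ?_⟩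
    · intro j hj
      by_cases hji : j = i
      · subst hji
        rw [getD_set_self _ _ _ hi]
        exact h1
      · rw [getD_set_ne _ _ _ _ (fun h => hji h.symm)] at hj ⊢
        exact hinv j hji hj
    · rw [List.countP_set hi, List.countP_set hir, getD_lt _ _ hi, getD_lt _ _ hir]
      have hrne : r[i] ≠ 0 := by rw [← getD_lt _ _ hir]; exact h1
      have hposr : 0 < r.countP (· != 0) :=
        List.countP_pos_iff.mpr ⟨r[i], List.getElem_mem hir, by simpa using hrne⟩
      by_cases hz : l[i] = 0
      · simp [hz, hrne]
        omega
      · have hposl : 0 < l.countP (· != 0) :=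
          List.countP_pos_iff.mpr ⟨l[i], List.getElem_mem hi, by simpa using hz⟩
        simp [hz, hrne]
        omega
  | case3 l i h1 h2 ih =>
    intro hN hi hlen hinv
    have hv : l.getD (i + 1) 0 ≠ 0 := fun h => h2 (Or.inr (Or.inl h))
    have hi1 : i + 1 < l.length := getD_pos_lt _ _ hv
    set w := l.getD (i + 1) 0 with hw
    obtain ⟨x, y, l', r', heq, hlen', hrlen', hinv', hcnt'⟩ := ih (by simp; omega) (by simpa using hi1)
      (by simpa using hlen)
      (by
        intro j hj hr
        by_cases hji : j = i
        · subst hji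
          rw [getD_set_ne _ _ _ _ (by omega), getD_set_self _ _ _ hi]
          exact hv
        · rw [getD_set_ne _ _ _ _ (fun h => hj h.symm), getD_set_ne _ _ _ _ (fun h => hji h.symm)]
          exact hinv j hji hr)
    refine ⟨x, y, l', r', heq, by simpa using hlen', hrlen', hinv', ?_⟩
    have hz2 : ((l.set i w).set (i + 1) 0).getD (i + 1) 0 = 0 :=
      getD_set_self _ _ _ (by simpa using hi1)
    rw [hz2] at hcnt'
    norm_num at hcnt'
    have hmid : (l.set i w)[i + 1]'(by simpa using hi1) = l[i + 1]'hi1 :=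
      List.getElem_set_ne (by omega) (by simpa using hi1)
    have hwi1 : w = l[i + 1] := by rw [hw, getD_lt _ _ hi1]
    have hne : (l[i + 1] != 0) = true := by
      simp only [bne_iff_ne, ne_eq]
      rw [← getD_lt _ _ hi1, ← hw]
      exact hv
    have hcount2 : ((l.set i w).set (i + 1) 0).countP (· != 0) + 1
        = (l.set i w).countP (· != 0) := by
      have hpos : 0 < (l.set i w).countP (· != 0) := by
        refine List.countP_pos_iff.mpr ⟨l[i + 1], ?_, hne⟩
        rw [← hmid]
        exact List.getElem_mem (by simpa using hi1)
      rw [List.countP_set (by simpa using hi1), hmid, hne]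
      norm_num
      omega
    have hne1 : (w != 0) = true := by simpa using hv
    have hcount1 : (l.set i w).countP (· != 0)
        = l.countP (· != 0) + 1 - (if l[i] = 0 then 0 else 1) := by
      rw [List.countP_set hi, hne1]
      norm_num
      by_cases hz : l[i] = 0
      · simp [hz]
      · have hpos : 0 < l.countP (· != 0) :=
          List.countP_pos_iff.mpr ⟨l[i], List.getElem_mem hi, by simpa using hz⟩
        simp [hz]
        omega
    rw [getD_lt _ _ hi]
    by_cases hz : l[i] = 0
    · rw [if_pos hz] at hcount1 ⊢
      omega
    · rw [if_neg hz] at hcount1 ⊢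
      have hpos : 0 < l.countP (· != 0) :=
        List.countP_pos_iff.mpr ⟨l[i], List.getElem_mem hi, by simpa using hz⟩
      omega

theorem colL_set (g : List (List Int)) (i : Nat) (row : List Int) :
    colL (g.set i row) = (colL g).set i (row.getD 0 0) := by
  simp [colL, List.map_set]

theorem colR_set (g : List (List Int)) (i : Nat) (row : List Int) :
    colR (g.set i row) = (colR g).set i (row.getD 1 0) := by
  simp [colR, List.map_set]

theorem rows_set (g : List (List Int)) (i : Nat) (row : List Int)
    (hrows : ∀ r ∈ g, 2 ≤ r.length) (hrow : 2 ≤ row.length) :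
    ∀ r ∈ g.set i row, 2 ≤ r.length := by
  intro r hr
  rcases List.mem_or_eq_of_mem_set hr with h | rfl
  · exact hrows r h
  · exact hrow

-- A's compare_neighbors chain is B's chain on the two columns
theorem cmpA_eq (g : List (List Int)) (i : Nat)
    (hrows : ∀ row ∈ g, 2 ≤ row.length) (hi : i < g.length) :
    ∃ x y l' r' g', chainB g.length (colL g) (colR g) i = (x, y, l', r') ∧
      cmpA g i 0 = some ((x, y), g') ∧ colL g' = l' ∧ colR g' = r' ∧
      g'.length = g.length ∧ (∀ row ∈ g', 2 ≤ row.length) := by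
  revert hrows hi
  fun_induction cmpA g i 0 with
  | case1 g i hrow =>
    intro hrows hi
    have := List.getElem?_eq_none_iff.mp hrow
    omega
  | case2 g i rowi hrow h1 =>
    intro hrows hi
    have := List.getElem?_eq_none_iff.mp h1
    have := hrows rowi (List.mem_of_getElem? hrow)
    omega
  | case3 g i rowi hrow h1 =>
    intro hrows hi
    obtain ⟨hlt, hgi⟩ := List.getElem?_eq_some_iff.mp hrow
    have hrl : 2 ≤ rowi.length := hrows rowi (List.mem_of_getElem? hrow)
    have hr0 : rowi.getD 1 0 = 0 := by simp [List.getD_eq_getElem?_getD, h1]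
    have hcolR : (colR g).getD i 0 = 0 := by
      rw [colR, getD_map_lt _ _ _ hlt, hgi, hr0]
    rw [chainB, if_pos hcolR]
    refine ⟨0, i, (colL g).set i 0, colR g, g.set i (rowi.set 0 0), rfl, rfl, ?_, ?_, by simp, ?_⟩
    · rw [colL_set]
      have : (rowi.set 0 0).getD 0 0 = 0 := getD_set_self _ _ _ (by omega)
      rw [this]
    · rw [colR_set]
      have h2 : (rowi.set 0 0).getD 1 0 = rowi.getD 1 0 := getD_set_ne _ _ _ _ (by omega)
      rw [h2, hr0]
      conv_lhs => rw [← hcolR]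
      exact set_getD_cancel (colR g) i (by simp [colR]; omega)
    · exact rows_set _ _ _ hrows (by simpa using hrl)
  | case4 g i rowi hrow v1 h1 hne hlen =>
    intro hrows hi
    obtain ⟨hlt, hgi⟩ := List.getElem?_eq_some_iff.mp hrow
    have hrl : 2 ≤ rowi.length := hrows rowi (List.mem_of_getElem? hrow)
    have hr1 : rowi.getD 1 0 = v1 := by simp [List.getD_eq_getElem?_getD, h1]
    have hcolR : (colR g).getD i 0 = v1 := by
      rw [colR, getD_map_lt _ _ _ hlt, hgi, hr1]
    have hN : i + 1 = g.length := hlen.symm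
    rw [chainB, if_neg (by rw [hcolR]; exact hne), if_pos (Or.inl hlen.symm)]
    refine ⟨1, i, (colL g).set i ((colR g).getD i 0), (colR g).set i 0,
      g.set i ((rowi.set 0 v1).set 1 0), rfl, rfl, ?_, ?_, by simp, ?_⟩
    · rw [colL_set, hcolR]
      have : ((rowi.set 0 v1).set 1 0).getD 0 0 = v1 := by
        rw [getD_set_ne _ _ _ _ (by omega), getD_set_self _ _ _ (by omega)]
      rw [this]
    · rw [colR_set]
      have : ((rowi.set 0 v1).set 1 0).getD 1 0 = 0 := getD_set_self _ _ _ (by simpa using hrl)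
      rw [this]
    · exact rows_set _ _ _ hrows (by simpa using hrl)
  | case5 g i rowi hrow v1 h1 hne hlen hri1 =>
    intro hrows hi
    have := List.getElem?_eq_none_iff.mp hri1
    simp only [List.length_set] at this
    omega
  | case6 g i rowi hrow v1 h1 hne hlen rowi1 hri1 h2 =>
    intro hrows hi
    have hmem : rowi1 ∈ g.set i rowi := List.mem_of_getElem? hri1
    have hrl : 2 ≤ rowi1.length := by
      rcases List.mem_or_eq_of_mem_set hmem with h | rfl
      · exact hrows rowi1 h
      · exact hrows rowi1 (List.mem_of_getElem? hrow)
    have := List.getElem?_eq_none_iff.mp h2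
    omega
  | case7 g i rowi hrow v1 h1 hne hlen rowi1 hri1 v2 h2 hcond =>
    intro hrows hi
    obtain ⟨hlt, hgi⟩ := List.getElem?_eq_some_iff.mp hrow
    have hrl : 2 ≤ rowi.length := hrows rowi (List.mem_of_getElem? hrow)
    have hri1' : g[i + 1]? = some rowi1 := by
      rw [← List.getElem?_set_ne (by omega : i ≠ i + 1) (a := rowi)]
      exact hri1
    obtain ⟨hlt1, hgi1⟩ := List.getElem?_eq_some_iff.mp hri1'
    have hrl1 : 2 ≤ rowi1.length := hrows rowi1 (List.mem_of_getElem? hri1')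
    have hr1 : rowi.getD 1 0 = v1 := by simp [List.getD_eq_getElem?_getD, h1]
    have hr20 : rowi1.getD 0 0 = v2 := by simp [List.getD_eq_getElem?_getD, h2]
    have hcolR : (colR g).getD i 0 = v1 := by
      rw [colR, getD_map_lt _ _ _ hlt, hgi, hr1]
    have hcolL1 : (colL g).getD (i + 1) 0 = v2 := by
      rw [colL, getD_map_lt _ _ _ hlt1, hgi1, hr20]
    rw [chainB, if_neg (by rw [hcolR]; exact hne),
      if_pos (by
        rcases hcond with h | h
        · exact Or.inr (Or.inl (by rw [hcolL1]; exact h))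
        · exact Or.inr (Or.inr (by rw [hcolR, hcolL1]; exact h)))]
    refine ⟨1, i, (colL g).set i ((colR g).getD i 0), (colR g).set i 0,
      g.set i ((rowi.set 0 v1).set 1 0), rfl, rfl, ?_, ?_, by simp, ?_⟩
    · rw [colL_set, hcolR]
      have : ((rowi.set 0 v1).set 1 0).getD 0 0 = v1 := by
        rw [getD_set_ne _ _ _ _ (by omega), getD_set_self _ _ _ (by omega)]
      rw [this]
    · rw [colR_set]
      have : ((rowi.set 0 v1).set 1 0).getD 1 0 = 0 := getD_set_self _ _ _ (by simpa using hrl)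
      rw [this]
    · exact rows_set _ _ _ hrows (by simpa using hrl)
  | case8 g i rowi hrow v1 h1 hne hlen rowi1 hri1 v2 h2 hcond ih =>
    intro hrows hi
    obtain ⟨hlt, hgi⟩ := List.getElem?_eq_some_iff.mp hrow
    have hrl : 2 ≤ rowi.length := hrows rowi (List.mem_of_getElem? hrow)
    have hri1' : g[i + 1]? = some rowi1 := by
      rw [← List.getElem?_set_ne (by omega : i ≠ i + 1) (a := rowi)]
      exact hri1
    obtain ⟨hlt1, hgi1⟩ := List.getElem?_eq_some_iff.mp hri1'
    have hrl1 : 2 ≤ rowi1.length := hrows rowi1 (List.mem_of_getElem? hri1')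
    have hr1 : rowi.getD 1 0 = v1 := by simp [List.getD_eq_getElem?_getD, h1]
    have hr20 : rowi1.getD 0 0 = v2 := by simp [List.getD_eq_getElem?_getD, h2]
    have hcolR : (colR g).getD i 0 = v1 := by
      rw [colR, getD_map_lt _ _ _ hlt, hgi, hr1]
    have hcolL1 : (colL g).getD (i + 1) 0 = v2 := by
      rw [colL, getD_map_lt _ _ _ hlt1, hgi1, hr20]
    have hv2 : v2 ≠ 0 := fun h => hcond (Or.inl h)
    -- the mutated grid of A's recursive call
    have hrows2 : ∀ r ∈ (g.set i (rowi.set 0 v2)).set (i + 1) (rowi1.set 0 0), 2 ≤ r.length := by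
      apply rows_set _ _ _ (rows_set _ _ _ hrows (by simpa using hrl)) (by simpa using hrl1)
    have hlen2 : ((g.set i (rowi.set 0 v2)).set (i + 1) (rowi1.set 0 0)).length = g.length := by
      simp
    obtain ⟨x, y, l', r', g', hchain, hcmp, hL, hR, hglen, hgrows⟩ := ih hrows2 (by omega)
    -- identify B's recursive state with the columns of A's mutated grid
    have hLg2 : colL ((g.set i (rowi.set 0 v2)).set (i + 1) (rowi1.set 0 0))
        = ((colL g).set i ((colL g).getD (i + 1) 0)).set (i + 1) 0 := by
      rw [colL_set, colL_set, hcolL1]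
      have e1 : (rowi.set 0 v2).getD 0 0 = v2 := getD_set_self _ _ _ (by omega)
      have e2 : (rowi1.set 0 0).getD 0 0 = 0 := getD_set_self _ _ _ (by omega)
      rw [e1, e2]
    have hRg2 : colR ((g.set i (rowi.set 0 v2)).set (i + 1) (rowi1.set 0 0)) = colR g := by
      rw [colR_set, colR_set]
      have e1 : (rowi.set 0 v2).getD 1 0 = rowi.getD 1 0 := getD_set_ne _ _ _ _ (by omega)
      have e2 : (rowi1.set 0 0).getD 1 0 = rowi1.getD 1 0 := getD_set_ne _ _ _ _ (by omega)
      have f1 : rowi.getD 1 0 = (colR g).getD i 0 := by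
        rw [colR, getD_map_lt _ _ _ hlt, hgi]
      have f2 : rowi1.getD 1 0 = (colR g).getD (i + 1) 0 := by
        rw [colR, getD_map_lt _ _ _ hlt1, hgi1]
      rw [e1, e2, f1, f2, set_getD_cancel (colR g) i (by simp [colR]; omega)]
      exact set_getD_cancel (colR g) (i + 1) (by simp [colR]; omega)
    rw [chainB, if_neg (by rw [hcolR]; exact hne),
      if_neg (by
        rintro (h | h | h)
        · omega
        · rw [hcolL1] at h; exact hv2 h
        · rw [hcolR, hcolL1] at h; exact hcond (Or.inr h))]
    refine ⟨x, y, l', r', g', ?_, hcmp, hL, hR, by omega, hgrows⟩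
    rw [← hLg2, ← hRg2, show g.length = ((g.set i (rowi.set 0 v2)).set (i + 1) (rowi1.set 0 0)).length by simp]
    exact hchain

-- the outer evacuation loops agree
theorem loop_eq (k : Nat) : ∀ (g : List (List Int)) (t0 t1 : List Int),
    (∀ row ∈ g, 2 ≤ row.length) →
    (∀ j, (colR g).getD j 0 ≠ 0 → (colL g).getD j 0 ≠ 0) →
    k ≤ (colL g).countP (· != 0) + (colR g).countP (· != 0) →
    evacLoopA g t0 t1 k = loopB g.length (colL g) (colR g) t0 t1 k := by
  induction k with
  | zero => intro g t0 t1 _ _ _; rfl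
  | succ k ih =>
    intro g t0 t1 hrows hinv hk
    obtain ⟨j0, hj0⟩ := exists_left_nonzero (colL g) (colR g) hinv (by omega)
    cases hscan : scanB (colL g) 0 with
    | none => exact absurd (scanB_none _ _ hscan j0 (Nat.zero_le _)) hj0
    | some i =>
      obtain ⟨hilt, hine⟩ := scanB_some _ _ _ hscan
      have hig : i < g.length := by simpa [colL] using hilt
      have hsA : scanA g 0 = some i := by
        rw [scanA_eq g (fun r hr => by have := hrows r hr; omega) 0, hscan]
      obtain ⟨x, y, l', r', g', hchain, hcmp, hL, hR, hglen, hgrows⟩ := cmpA_eq g i hrows hig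
      have htmp : (g.getD i []).getD 0 0 = (colL g).getD i 0 := by
        rw [colL, getD_map_lt _ _ _ hig]
        congr 1
        rw [List.getD_eq_getElem?_getD, List.getElem?_eq_getElem hig]
        rfl
      have hfind : findA g = some ((colL g).getD i 0, (x, y), g') := by
        rw [findA, hsA]
        simp only [hcmp, htmp]
      obtain ⟨x₂, y₂, l₂, r₂, hchain₂, hlen₂, hrlen₂, hinv₂, hcnt₂⟩ :=
        chainB_spec g.length (colL g) (colR g) i (by simp [colL]) hilt
          (by simp [colL, colR]) (fun j _ => hinv j)
      rw [hchain] at hchain₂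
      obtain ⟨rfl, rfl, rfl, rfl⟩ : x = x₂ ∧ y = y₂ ∧ l' = l₂ ∧ r' = r₂ := by
        have h1 := congrArg Prod.fst hchain₂
        have h2 := congrArg (fun p => p.2.1) hchain₂
        have h3 := congrArg (fun p => p.2.2.1) hchain₂
        have h4 := congrArg (fun p => p.2.2.2) hchain₂
        exact ⟨h1, h2, h3, h4⟩
      rw [if_neg hine] at hcnt₂
      simp only [evacLoopA, loopB, hfind, hscan, hchain]
      have := ih g' (if x = 0 then t0.set y ((colL g).getD i 0) else t0)
        (if x = 1 then t1.set y ((colL g).getD i 0) else t1) hgrows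
        (by rw [hL, hR]; exact hinv₂)
        (by rw [hL, hR]; omega)
      rw [this, hL, hR, hglen]

-- ===== VERDICT (by name: the statement is the Claim_ definition above) =====
theorem evacuation_spec : Claim_equal_evacuation := by
  intro inv _ pre
  unfold Spec_evacuation evacuation evacuation_alt
  obtain ⟨hne, hrow0, hk⟩ := pre
  by_cases h1 : 1 ≤ (inv.getD 0 []).getD 0 0
  · obtain ⟨hrows, hinv, hcnt⟩ := hk h1
    have hinv' : ∀ j, (colR inv).getD j 0 ≠ 0 → (colL inv).getD j 0 ≠ 0 := by
      intro j hj
      have hjlt : j < inv.length := by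
        have := getD_pos_lt _ _ hj
        simpa [colR] using this
      rw [colR, getD_map_lt _ _ _ hjlt] at hj
      rw [colL, getD_map_lt _ _ _ hjlt]
      exact hinv _ (List.getElem_mem hjlt) hj
    have hcnt' : ((inv.getD 0 []).getD 0 0).toNat
        ≤ (colL inv).countP (· != 0) + (colR inv).countP (· != 0) := by
      rw [colL, colR]; omega
    simpa [colL, colR] using loop_eq _ inv _ _ hrows hinv' hcnt'
  · have h0 : ((inv.getD 0 []).getD 0 0).toNat = 0 := by omega
    rw [h0]
    simp [evacLoopA, loopB]
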